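-- pv_equiv track=rewrite | github.com/zonkia/PathFinder | main.py | create_named_graph
-- ===== SOURCE A (Python) =====
-- def create_named_graph(graph):
--     i = 0
--     for row in graph:
--         i += len(row)
--     height = len(graph)
--     width = len(graph[0])
--     namedGraph = []
--     namedRow = []
--     number = 0
--     for y in range(height):
--         for x in range(width):
--             if graph[y][x] != 0:
--                 namedRow.append(0)
--                 continue
--             number += 1
--             namedRow.append(number)
--         namedGraph.append(namedRow)
--         namedRow = []
--
--     return namedGraph
-- ===== SOURCE B (Python) =====
-- def create_named_graph(graph):
--     height = len(graph)
--     width = len(graph[0])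
--
--     def free(y, x):
--         return graph[y][x] == 0
--
--     def rank(y, x):
--         # 1-based position of (y, x) among free cells in row-major order:
--         # free cells in all earlier rows plus free cells in this row up to x.
--         return (sum(free(yy, xx) for yy in range(y) for xx in range(width))
--                 + sum(free(y, xx) for xx in range(x + 1)))
--
--     return [[rank(y, x) if free(y, x) else 0 for x in range(width)]
--             for y in range(height)]
-- ===== Notes on version B (the rewrite author's own statement) =====
-- stated objective: alternative
-- what changed: Replaces the stateful nested loop with a running counter and list mutation by a stateless per-cell closed form: each free cell's label is computed independently as the count of free cells at or before it in row-major order (free cells in earlier rows plus free cells in its row up to its column); blocked cells get 0 and the dead row-length summation is dropped.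
import Mathlib
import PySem

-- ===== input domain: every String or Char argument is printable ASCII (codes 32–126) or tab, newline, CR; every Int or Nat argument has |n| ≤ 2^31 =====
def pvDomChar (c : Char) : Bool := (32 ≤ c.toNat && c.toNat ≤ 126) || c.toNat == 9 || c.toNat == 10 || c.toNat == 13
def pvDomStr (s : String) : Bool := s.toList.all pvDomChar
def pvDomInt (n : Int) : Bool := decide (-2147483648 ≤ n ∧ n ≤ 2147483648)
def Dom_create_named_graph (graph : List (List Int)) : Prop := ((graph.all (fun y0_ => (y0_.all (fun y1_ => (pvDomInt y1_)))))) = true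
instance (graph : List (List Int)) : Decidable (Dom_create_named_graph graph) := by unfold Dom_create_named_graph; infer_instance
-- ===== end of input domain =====

-- B replaces the stateful running-counter loop by a stateless per-cell closed form
-- (each free cell's label = count of free cells at or before it in row-major order);
-- same results, no accumulator, at a higher asymptotic cost.

-- ===== PORT A =====
def create_named_graph (graph : List (List Int)) : List (List Int) :=
  let _i : Int := graph.foldl (fun i row => i + (row.length : Int)) 0
  let height : Int := (graph.length : Int)
  let width : Int := (((PySem.List.pyGet? graph 0).getD []).length : Int)
  let st := (PySem.List.pyRange 0 height).foldl
    (fun (st : Int × List (List Int)) y =>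
      let inner := (PySem.List.pyRange 0 width).foldl
        (fun (st2 : Int × List Int) x =>
          if PySem.List.pyGetD (PySem.List.pyGetD graph y []) x 0 ≠ 0 then
            (st2.1, st2.2 ++ [0])
          else
            (st2.1 + 1, st2.2 ++ [st2.1 + 1]))
        (st.1, ([] : List Int))
      (inner.1, st.2 ++ [inner.2]))
    (0, ([] : List (List Int)))
  st.2

-- ===== PORT B =====
-- Source B's nested helper 'free(y, x)': graph[y][x] == 0
def pvFree (graph : List (List Int)) (y x : Int) : Bool :=
  decide (PySem.List.pyGetD (PySem.List.pyGetD graph y []) x 0 = 0)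

def create_named_graph_alt (graph : List (List Int)) : List (List Int) :=
  let height : Int := (graph.length : Int)
  let width : Int := (((PySem.List.pyGet? graph 0).getD []).length : Int)
  -- rank y x = free cells in earlier rows + free cells in this row up to x
  let rank : Int → Int → Int := fun y x =>
    (((PySem.List.pyRange 0 y).map (fun yy =>
        (PySem.List.pyRange 0 width).map (fun xx => if pvFree graph yy xx then (1 : Int) else 0))).flatten).sum
    + ((PySem.List.pyRange 0 (x + 1)).map (fun xx => if pvFree graph y xx then (1 : Int) else 0)).sum
  (PySem.List.pyRange 0 height).map (fun y =>
    (PySem.List.pyRange 0 width).map (fun x => if pvFree graph y x then rank y x else 0))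

-- ===== PRECONDITION & SPEC =====
-- Pre_ excludes exactly the inputs where Python A raises IndexError: the empty
-- graph (graph[0]) and ragged graphs with a row shorter than the first row
-- (graph[y][x] for x < width).  B raises the same IndexError on those inputs.
def Pre_create_named_graph (graph : List (List Int)) : Prop :=
  graph ≠ [] ∧ ∀ row ∈ graph, graph.headI.length ≤ row.length
instance (graph : List (List Int)) : Decidable (Pre_create_named_graph graph) := by
  unfold Pre_create_named_graph; infer_instance

def pvWitness_create_named_graph : List (List Int) := [[0, 1, 0], [1, 0, 0]]

def Spec_create_named_graph (graph : List (List Int)) (out : List (List Int)) : Prop := out = create_named_graph_alt graph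
instance (graph : List (List Int)) (out : List (List Int)) : Decidable (Spec_create_named_graph graph out) := by unfold Spec_create_named_graph; infer_instance

-- ===== CLAIM (what is proved, stated in full; the proofs are below) =====
def Claim_equal_create_named_graph : Prop := ∀ (graph : List (List Int)), Dom_create_named_graph graph → Pre_create_named_graph graph → Spec_create_named_graph graph (create_named_graph graph)

-- ===== LEMMAS AND PROOFS =====

-- A's inner-loop step function and the labelling it folds out, abstracted over the mask
def pvBody (st : Int × List Int) (f : Bool) : Int × List Int :=
  if f then (st.1 + 1, st.2 ++ [st.1 + 1]) else (st.1, st.2 ++ [0])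

def pvLab (c : Int) (bs : List Bool) : Int × List Int := bs.foldl pvBody (c, [])

-- number of free cells in a mask, as the Int sum both sides compute
def pvCnt (bs : List Bool) : Int := (bs.map (fun b => if b then (1 : Int) else 0)).sum

theorem pvCnt_cons (b : Bool) (bs : List Bool) :
    pvCnt (b :: bs) = (if b then (1 : Int) else 0) + pvCnt bs := by
  simp [pvCnt]

theorem pvLab_shift (bs : List Bool) (c : Int) (acc : List Int) :
    bs.foldl pvBody (c, acc) = ((pvLab c bs).1, acc ++ (pvLab c bs).2) := by
  induction bs generalizing c acc with
  | nil => simp [pvLab]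
  | cons b bs ih =>
    cases b <;>
      simp only [pvLab, List.foldl_cons, pvBody, Bool.false_eq_true, ite_true, ite_false] <;>
      rw [ih, ih] <;> simp

theorem pvLab_cons (b : Bool) (bs : List Bool) (c : Int) :
    pvLab c (b :: bs)
      = ((pvLab (c + if b then 1 else 0) bs).1,
         (if b then c + 1 else 0) :: (pvLab (c + if b then 1 else 0) bs).2) := by
  cases b <;>
    simp only [pvLab, List.foldl_cons, pvBody, Bool.false_eq_true, ite_true, ite_false] <;>
    rw [pvLab_shift] <;>
    simp only [List.nil_append, List.singleton_append, add_zero] <;> rfl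

theorem pvLab_fst (bs : List Bool) (c : Int) : (pvLab c bs).1 = c + pvCnt bs := by
  induction bs generalizing c with
  | nil => simp [pvLab, pvCnt]
  | cons b bs ih =>
    rw [pvLab_cons, pvCnt_cons]
    dsimp only
    rw [ih]
    rw [add_assoc]

-- the label of cell j is the count of free cells up to and including j (closed form)
theorem pvLab_snd (bs : List Bool) (c : Int) :
    (pvLab c bs).2 = (List.range bs.length).map
      (fun j => if bs.getD j false then c + pvCnt (bs.take (j + 1)) else 0) := by
  induction bs generalizing c with
  | nil => simp [pvLab]
  | cons b bs ih =>
    rw [pvLab_cons]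
    simp only [List.length_cons, List.range_succ_eq_map, List.map_cons, List.map_map]
    congr 1
    · cases b <;> simp [pvCnt]
    · rw [ih]
      apply List.map_congr_left
      intro j _
      simp only [Function.comp_apply, Nat.succ_eq_add_one, List.getD_cons_succ,
        List.take_succ_cons, pvCnt_cons]
      by_cases hj : bs.getD j false
      · rw [if_pos hj, if_pos hj]
        cases b <;> simp [add_assoc]
      · rw [if_neg hj, if_neg hj]

-- A's outer per-row accumulation, abstracted over the cell mask
def pvRows (cells : Int → List Bool) (ys : List Int) (c : Int) : Int × List (List Int) :=
  ys.foldl (fun st y => ((pvLab st.1 (cells y)).1, st.2 ++ [(pvLab st.1 (cells y)).2])) (c, [])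

theorem pvRows_shift (cells : Int → List Bool) (ys : List Int) (c : Int) (acc : List (List Int)) :
    ys.foldl (fun st y => ((pvLab st.1 (cells y)).1, st.2 ++ [(pvLab st.1 (cells y)).2])) (c, acc)
      = ((pvRows cells ys c).1, acc ++ (pvRows cells ys c).2) := by
  induction ys generalizing c acc with
  | nil => simp [pvRows]
  | cons y ys ih =>
    simp only [pvRows, List.foldl_cons]
    rw [ih]; rw [ih]
    simp

theorem pvRows_cons (cells : Int → List Bool) (y : Int) (ys : List Int) (c : Int) :
    pvRows cells (y :: ys) c
      = ((pvRows cells ys (pvLab c (cells y)).1).1,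
         (pvLab c (cells y)).2 :: (pvRows cells ys (pvLab c (cells y)).1).2) := by
  simp only [pvRows, List.foldl_cons]
  rw [pvRows_shift]
  simp only [List.nil_append, List.singleton_append]
  rfl

-- the cell mask both ports read: graph[y][x] == 0 for x in range(width)
def pvCells (graph : List (List Int)) (y : Int) : List Bool :=
  (PySem.List.pyRange 0 ((((PySem.List.pyGet? graph 0).getD []).length : Int))).map
    (fun x => pvFree graph y x)

theorem pvCells_eq_map (graph : List (List Int)) (y : Int) :
    pvCells graph y = (List.range (((PySem.List.pyGet? graph 0).getD []).length)).map
      (fun (k : Nat) => pvFree graph y (k : Int)) := by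
  unfold pvCells
  rw [PySem.List.pyRange_zero_nat, List.map_map]
  rfl

-- number of free cells in rows 0..r-1: the base offset of row r
def pvBase (graph : List (List Int)) (r : Nat) : Int :=
  ((List.range r).map (fun (yy : Nat) => pvCnt (pvCells graph (yy : Int)))).sum

theorem pvBase_succ (graph : List (List Int)) (r : Nat) :
    pvBase graph (r + 1) = pvBase graph r + pvCnt (pvCells graph (r : Int)) := by
  simp [pvBase, List.range_succ]

theorem pvCnt_map_range (f : Nat → Bool) (n : Nat) :
    pvCnt ((List.range n).map f)
      = ((List.range n).map (fun j => if f j then (1 : Int) else 0)).sum := by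
  unfold pvCnt
  rw [List.map_map]
  exact congrArg _ (List.map_congr_left (fun _ _ => rfl))

-- the common closed-form grid both ports compute
def pvGrid (graph : List (List Int)) : List (List Int) :=
  (List.range graph.length).map (fun (r : Nat) =>
    (List.range (((PySem.List.pyGet? graph 0).getD []).length)).map (fun (k : Nat) =>
      if pvFree graph (r : Int) (k : Int)
      then pvBase graph r
        + pvCnt ((List.range (k + 1)).map (fun (j : Nat) => pvFree graph (r : Int) (j : Int)))
      else 0))

-- A's inner loop is the cumulative labelling of the row's cell mask
theorem pvInner_eq (graph : List (List Int)) (c : Int) (y : Int) :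
    (PySem.List.pyRange 0 ((((PySem.List.pyGet? graph 0).getD []).length : Int))).foldl
      (fun (st2 : Int × List Int) x =>
        if PySem.List.pyGetD (PySem.List.pyGetD graph y []) x 0 ≠ 0 then
          (st2.1, st2.2 ++ [0])
        else
          (st2.1 + 1, st2.2 ++ [st2.1 + 1])) (c, []) = pvLab c (pvCells graph y) := by
  unfold pvLab pvCells
  rw [List.foldl_map]
  congr 1
  funext st x
  by_cases h : PySem.List.pyGetD (PySem.List.pyGetD graph y []) x 0 = 0 <;> simp [pvBody, pvFree, h]

-- A's row sweep, started at row r with the correct base count, yields per-row labellings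
theorem pvOuter (graph : List (List Int)) (m r : Nat) :
    (pvRows (pvCells graph) ((List.range' r m).map (fun (k : Nat) => (k : Int))) (pvBase graph r)).2
      = (List.range' r m).map (fun z => (pvLab (pvBase graph z) (pvCells graph (z : Int))).2) := by
  induction m generalizing r with
  | zero => simp [pvRows]
  | succ m ih =>
    have hsplit : (List.range' r (m + 1)).map (fun (k : Nat) => (k : Int))
        = ((r : Nat) : Int) :: (List.range' (r + 1) m).map (fun (k : Nat) => (k : Int)) := by
      rw [List.range'_succ]; rfl
    rw [hsplit, pvRows_cons, List.range'_succ, List.map_cons]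
    dsimp only
    congr 1
    rw [pvLab_fst, ← pvBase_succ]
    exact ih (r + 1)

theorem pvCells_length (graph : List (List Int)) (y : Int) :
    (pvCells graph y).length = ((PySem.List.pyGet? graph 0).getD []).length := by
  simp [pvCells, PySem.List.length_pyRange_one]

-- take of the mask is the mask of the shorter range
theorem pvCells_take (graph : List (List Int)) (y : Int) (k : Nat)
    (hk : k + 1 ≤ ((PySem.List.pyGet? graph 0).getD []).length) :
    (pvCells graph y).take (k + 1)
      = (List.range (k + 1)).map (fun (j : Nat) => pvFree graph y (j : Int)) := by
  rw [pvCells_eq_map, ← List.map_take, List.take_range, Nat.min_eq_left hk]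

-- PORT A computes the closed-form grid
theorem A_eq_grid (graph : List (List Int)) : create_named_graph graph = pvGrid graph := by
  unfold create_named_graph
  dsimp only
  rw [show (fun (st : Int × List (List Int)) y =>
        let inner := (PySem.List.pyRange 0 ((((PySem.List.pyGet? graph 0).getD []).length : Int))).foldl
          (fun (st2 : Int × List Int) x =>
            if PySem.List.pyGetD (PySem.List.pyGetD graph y []) x 0 ≠ 0 then
              (st2.1, st2.2 ++ [0])
            else
              (st2.1 + 1, st2.2 ++ [st2.1 + 1])) (st.1, ([] : List Int))
        (inner.1, st.2 ++ [inner.2]))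
      = (fun (st : Int × List (List Int)) y =>
          ((pvLab st.1 (pvCells graph y)).1, st.2 ++ [(pvLab st.1 (pvCells graph y)).2])) by
    funext st y; dsimp only; rw [pvInner_eq]]
  have hfold : (PySem.List.pyRange 0 ((graph.length : Int))).foldl
      (fun st y => ((pvLab st.1 (pvCells graph y)).1, st.2 ++ [(pvLab st.1 (pvCells graph y)).2]))
      (0, ([] : List (List Int)))
      = pvRows (pvCells graph) ((List.range' 0 graph.length).map (fun (k : Nat) => (k : Int))) (pvBase graph 0) := by
    unfold pvRows
    rw [PySem.List.pyRange_zero_nat, ← List.range_eq_range']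
    norm_num [pvBase]
  rw [hfold, pvOuter, ← List.range_eq_range']
  unfold pvGrid
  apply List.map_congr_left
  intro r _
  rw [pvLab_snd, pvCells_length]
  apply List.map_congr_left
  intro k hk
  have hkw : k < ((PySem.List.pyGet? graph 0).getD []).length := List.mem_range.mp hk
  rw [pvCells_eq_map, PySem.List.getD_map_range _ _ _ _ hkw, ← pvCells_eq_map,
    pvCells_take graph _ k (by omega)]

-- PORT B computes the closed-form grid
theorem B_eq_grid (graph : List (List Int)) : create_named_graph_alt graph = pvGrid graph := by
  unfold create_named_graph_alt pvGrid
  dsimp only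
  rw [PySem.List.pyRange_zero_nat graph.length,
    PySem.List.pyRange_zero_nat (((PySem.List.pyGet? graph 0).getD []).length),
    List.map_map]
  apply List.map_congr_left
  intro r _
  simp only [Function.comp_apply]
  rw [List.map_map]
  apply List.map_congr_left
  intro k hk
  have hkw : k < ((PySem.List.pyGet? graph 0).getD []).length := List.mem_range.mp hk
  simp only [Function.comp_apply]
  by_cases h : pvFree graph (r : Int) (k : Int)
  · rw [if_pos h, if_pos h]
    congr 1
    -- earlier rows: flatten-sum = pvBase
    · rw [PySem.List.pyRange_zero_nat r, List.sum_flatten, List.map_map, List.map_map]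
      unfold pvBase
      apply congrArg List.sum
      apply List.map_congr_left
      intro yy _
      simp only [Function.comp_apply]
      rw [pvCells_eq_map, pvCnt_map_range]
      rw [List.map_map]
      exact congrArg _ (List.map_congr_left (fun _ _ => rfl))
    -- this row up to k: prefix sum = pvCnt of the mask prefix
    · rw [show ((k : Int) + 1) = (((k + 1 : Nat)) : Int) by push_cast; ring,
        PySem.List.pyRange_zero_nat (k + 1), List.map_map, pvCnt_map_range]
      exact congrArg _ (List.map_congr_left (fun _ _ => rfl))
  · rw [if_neg h, if_neg h]

theorem create_named_graph_eq (graph : List (List Int)) :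
    create_named_graph graph = create_named_graph_alt graph := by
  rw [A_eq_grid, B_eq_grid]

-- ===== VERDICT (by name: the statement is the Claim_ definition above) =====
theorem create_named_graph_spec : Claim_equal_create_named_graph := by
  intro graph _ _
  unfold Spec_create_named_graph
  exact create_named_graph_eq graph
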